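-- pv_equiv track=rewrite | github.com/minsminsKR/LOL_Chat_report | report_app.py | is_valid_format
-- ===== SOURCE A (Python) =====
-- def is_valid_format(lst): # 형식 안맞을시 False 반환
--                           # Returns False if malformed
--     if not lst or len(lst) % 3 != 0: # 인풋이 없거나 ["챔피언이름", ":", "점수"] 이 형식처럼 리스트 길이가 3배수인지 체크
--                                      # Check if there is no input or if the length is 3 times as list above
--         return False
--
--     valid = True
--     for idx, elem in enumerate(lst):
--         if idx % 3 == 0: # 0부터 시작. idx 0,3,6... 챔피언 이름 위치에 문자열이 있는가?
--                          # Start from zero. Idx 0,3,6... Is there a string in the champion name position?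
--             if not isinstance(elem, str):
--                 valid = False
--                 break
--         elif idx % 3 == 1: # 챔피언 이름 다음 위치에 ":"이 있는가?
--                            # Is there a ":" next to the champion name?
--             if elem != ':':
--                 valid = False
--                 break
--         else: # 점수 자리에 정수가 있는가? Istrip('-')은 -를 빼고 숫자 맞는지 체크
--               # Is there an integer in the place of the score?
--             if not (isinstance(elem, str) and elem.lstrip('-').isdigit()):
--                 valid = False
--                 break
--
--     return valid
-- ===== SOURCE B (Python) =====
-- def is_valid_format(lst):
--     if not lst or len(lst) % 3 != 0:
--         return False
--     return all(
--         isinstance(lst[i], str) and lst[i + 1] == ':'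
--         and isinstance(lst[i + 2], str) and lst[i + 2].lstrip('-').isdigit()
--         for i in range(0, len(lst), 3)
--     )
-- ===== Notes on version B (the rewrite author's own statement) =====
-- stated objective: alternative
-- what changed: Replaced the enumerate loop with an idx%3 three-way branch and early break by a single all() over triple start indices range(0, len(lst), 3), checking each (name, ':', score) triple as a unit; the guard is unchanged.
import Mathlib
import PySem

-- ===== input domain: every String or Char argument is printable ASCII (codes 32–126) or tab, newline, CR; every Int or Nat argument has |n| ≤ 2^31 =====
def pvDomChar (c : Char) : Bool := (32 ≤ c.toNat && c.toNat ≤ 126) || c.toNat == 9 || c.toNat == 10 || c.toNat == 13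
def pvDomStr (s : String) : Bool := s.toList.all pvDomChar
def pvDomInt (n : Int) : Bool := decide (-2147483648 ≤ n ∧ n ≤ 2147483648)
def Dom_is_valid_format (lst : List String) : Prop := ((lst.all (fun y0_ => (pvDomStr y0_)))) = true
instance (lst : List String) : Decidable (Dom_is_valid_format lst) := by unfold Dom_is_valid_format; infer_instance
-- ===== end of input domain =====

-- B replaces A's enumerate/idx%3 dispatch with a single all() over triple start
-- indices; alternative decomposition, same cost.

-- shared helper: Python's  elem.lstrip('-').isdigit()  (both sources use this exact
-- expression).  lstrip('-') with the single strip char '-' is exactly dropWhile (== '-');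
-- isdigit is PySem.Chars.strIsdigit.  Exact on all inputs.
def scoreOk (s : String) : Bool :=
  PySem.Chars.strIsdigit (s.toList.dropWhile (fun c => c == '-'))

-- ===== PORT A =====
-- the for/enumerate loop with break: recursion over the list carrying idx.
-- isinstance(elem, str) is identically true under the type convention (lst : List String).
def aLoop : List String → Nat → Bool
  | [], _ => true
  | e :: rest, idx =>
    if idx % 3 == 0 then
      aLoop rest (idx + 1)            -- isinstance check: always passes
    else if idx % 3 == 1 then
      if e ≠ ":" then false else aLoop rest (idx + 1)
    else
      if ¬ (scoreOk e) then false else aLoop rest (idx + 1)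

def is_valid_format (lst : List String) : Bool :=
  if lst.isEmpty || decide (lst.length % 3 ≠ 0) then false
  else aLoop lst 0

-- ===== PORT B =====
-- one triple check, lst[i+1] == ':' and lst[i+2].lstrip('-').isdigit()
-- (the two isinstance(..., str) conjuncts are identically true under the type convention;
-- the indices are always in range under the guard, so pyGetD is exact here)
def tripleOk (lst : List String) (i : Int) : Bool :=
  PySem.List.pyGetD lst (i + 1) "" == ":" && scoreOk (PySem.List.pyGetD lst (i + 2) "")

def is_valid_format_alt (lst : List String) : Bool :=
  if lst.isEmpty || decide (lst.length % 3 ≠ 0) then false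
  else (PySem.List.pyRange 0 (lst.length : Int) 3).all (fun i => tripleOk lst i)

-- ===== PRECONDITION & SPEC =====
def Spec_is_valid_format (lst : List String) (out : Bool) : Prop := out = is_valid_format_alt lst
instance (lst : List String) (out : Bool) : Decidable (Spec_is_valid_format lst out) := by unfold Spec_is_valid_format; infer_instance

-- ===== CLAIM (what is proved, stated in full; the proofs are below) =====
def Claim_equal_is_valid_format : Prop := ∀ (lst : List String), Dom_is_valid_format lst → Spec_is_valid_format lst (is_valid_format lst)

-- ===== LEMMAS AND PROOFS =====

-- common characterisation: the list read as triples
def triples : List String → Bool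
  | _ :: c :: s :: rest => (c == ":") && scoreOk s && triples rest
  | _ => true

theorem aLoop_eq_triples : ∀ (m : Nat) (lst : List String), lst.length = 3 * m →
    ∀ (k : Nat), aLoop lst (3 * k) = triples lst := by
  intro m
  induction m with
  | zero =>
    intro lst h k
    match lst, h with
    | [], _ => rfl
  | succ m ih =>
    intro lst h k
    match lst with
    | n :: c :: s :: rest =>
      simp only [List.length_cons] at h
      have hrest : rest.length = 3 * m := by omega
      have h1 : (3 * k) % 3 = 0 := by omega
      have h2 : (3 * k + 1) % 3 = 1 := by omega
      have h3 : (3 * k + 1 + 1) % 3 = 2 := by omega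
      simp only [aLoop]
      simp [h1, h2, h3]
      rw [show 3 * k + 1 + 1 + 1 = 3 * (k + 1) by omega, ih rest hrest (k + 1)]
      by_cases hc : c = ":" <;> by_cases hs : scoreOk s = true <;> simp [triples, hc, hs]

theorem tripleOk_cons3 (n c s : String) (rest : List String) (j : Nat) :
    tripleOk (n :: c :: s :: rest) ((j : Int) + 3) = tripleOk rest (j : Int) := by
  unfold tripleOk
  rw [show ((j : Int) + 3 + 1) = ((j + 4 : Nat) : Int) by push_cast; ring,
      show ((j : Int) + 3 + 2) = ((j + 5 : Nat) : Int) by push_cast; ring,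
      show ((j : Int) + 1) = ((j + 1 : Nat) : Int) by push_cast; ring,
      show ((j : Int) + 2) = ((j + 2 : Nat) : Int) by push_cast; ring,
      PySem.List.pyGetD_natCast, PySem.List.pyGetD_natCast,
      PySem.List.pyGetD_natCast, PySem.List.pyGetD_natCast]
  simp only [show j + 4 = (j + 3) + 1 from by omega, show j + 3 = (j + 2) + 1 from by omega,
             show j + 5 = (((j + 2) + 1) + 1) + 1 from by omega,
             show j + 2 = (j + 1) + 1 from by omega, List.getD_cons_succ]

theorem range_all_eq_triples : ∀ (m : Nat) (lst : List String), lst.length = 3 * m →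
    (List.range m).all (fun k => tripleOk lst (3 * (k : Int))) = triples lst := by
  intro m
  induction m with
  | zero =>
    intro lst h
    match lst, h with
    | [], _ => rfl
  | succ m ih =>
    intro lst h
    match lst with
    | n :: c :: s :: rest =>
      simp only [List.length_cons] at h
      have hrest : rest.length = 3 * m := by omega
      rw [List.range_succ_eq_map, List.all_cons, List.all_map]
      have h0 : tripleOk (n :: c :: s :: rest) (3 * ((0 : Nat) : Int))
          = ((c == ":") && scoreOk s) := by
        unfold tripleOk
        norm_num
        rw [PySem.List.pyGetD_ofNat' _ 1, PySem.List.pyGetD_ofNat' _ 2]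
        rfl
      have hstep : ∀ (k : Nat),
          ((fun (k : Nat) => tripleOk (n :: c :: s :: rest) (3 * (k : Int))) ∘ Nat.succ) k
            = (fun (k : Nat) => tripleOk rest (3 * (k : Int))) k := by
        intro k
        simp only [Function.comp_apply]
        rw [show (3 : Int) * ((Nat.succ k : Nat) : Int) = ((3 * k : Nat) : Int) + 3 by
              push_cast; ring,
            tripleOk_cons3]
        congr 1
      rw [h0, List.all_congr rfl hstep, ih rest hrest]
      by_cases hc : c = ":" <;> by_cases hs : scoreOk s = true <;>
        simp [triples, hc, hs]

theorem alt_eq_triples (m : Nat) (lst : List String) (h : lst.length = 3 * m) (hm : 0 < m) :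
    (PySem.List.pyRange 0 (lst.length : Int) 3).all (fun i => tripleOk lst i) = triples lst := by
  rw [PySem.List.pyRange_of_pos 0 (lst.length : Int) (by norm_num)]
  have hlen : ((lst.length : Int) - 0 + 3 - 1) / 3 = (m : Int) := by
    rw [h]
    push_cast
    omega
  rw [if_pos (by rw [h]; push_cast; omega), hlen]
  simp only [Int.toNat_natCast, List.all_map]
  rw [← range_all_eq_triples m lst h]
  exact List.all_congr rfl (fun k => by simp)

-- ===== VERDICT (by name: the statement is the Claim_ definition above) =====
theorem is_valid_format_spec : Claim_equal_is_valid_format := by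
  intro lst _
  unfold Spec_is_valid_format is_valid_format is_valid_format_alt
  by_cases hg : (lst.isEmpty || decide (lst.length % 3 ≠ 0)) = true
  · rw [if_pos hg, if_pos hg]
  · rw [if_neg hg, if_neg hg]
    simp only [Bool.or_eq_true, decide_eq_true_eq, not_or] at hg
    have hne : lst ≠ [] := by
      intro he; exact absurd (by simp [he]) hg.1
    have hmod : lst.length % 3 = 0 := by
      by_contra hc; exact hg.2 hc
    obtain ⟨m, hm⟩ : ∃ m, lst.length = 3 * m := ⟨lst.length / 3, by omega⟩
    have hmpos : 0 < m := by
      have : lst.length ≠ 0 := by simpa using hne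
      omega
    rw [alt_eq_triples m lst hm hmpos]
    have : aLoop lst 0 = aLoop lst (3 * 0) := by norm_num
    rw [this, aLoop_eq_triples m lst hm 0]
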